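-- pv_equiv track=rewrite | github.com/zachlatta/personal-data-warehouse | src/personal_data_warehouse/clickhouse_readonly.py | _sql_words
-- ===== SOURCE A (Python) =====
-- def _sql_words(sql: str) -> list[str]:
--     words: list[str] = []
--     in_single = False
--     in_double = False
--     in_backtick = False
--     current: list[str] = []
--
--     def flush() -> None:
--         if current:
--             words.append("".join(current).upper())
--             current.clear()
--
--     for char in sql:
--         if char == "'" and not in_double and not in_backtick:
--             in_single = not in_single
--             flush()
--             continue
--         if char == '"' and not in_single and not in_backtick:
--             in_double = not in_double
--             flush()
--             continue
--         if char == "`" and not in_single and not in_double: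
--             in_backtick = not in_backtick
--             flush()
--             continue
--         if in_single or in_double or in_backtick:
--             continue
--         if char.isalnum() or char == "_":
--             current.append(char)
--             continue
--         flush()
--     flush()
--     return words
-- ===== SOURCE B (Python) =====
-- def _sql_words(sql: str) -> list[str]:
--     words: list[str] = []
--     s = sql
--     while s:
--         ch = s[0]
--         if ch in "'\"`":
--             # skip the whole quoted region at once (to the matching close, or all of it)
--             _, _, s = s[1:].partition(ch)
--         elif ch.isalnum() or ch == "_":
--             k = 1
--             while k < len(s) and (s[k].isalnum() or s[k] == "_"):
--                 k += 1
--             words.append(s[:k].upper())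
--             s = s[k:]
--         else:
--             s = s[1:]
--     return words
-- ===== Notes on version B (the rewrite author's own statement) =====
-- stated objective: simpler
-- what changed: Replaced A's character-at-a-time state machine with three quote flags and a pending buffer by a stateless suffix scan that consumes a whole quoted region at once (str.partition) and a whole word run at once (slice and upper).
import Mathlib
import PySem

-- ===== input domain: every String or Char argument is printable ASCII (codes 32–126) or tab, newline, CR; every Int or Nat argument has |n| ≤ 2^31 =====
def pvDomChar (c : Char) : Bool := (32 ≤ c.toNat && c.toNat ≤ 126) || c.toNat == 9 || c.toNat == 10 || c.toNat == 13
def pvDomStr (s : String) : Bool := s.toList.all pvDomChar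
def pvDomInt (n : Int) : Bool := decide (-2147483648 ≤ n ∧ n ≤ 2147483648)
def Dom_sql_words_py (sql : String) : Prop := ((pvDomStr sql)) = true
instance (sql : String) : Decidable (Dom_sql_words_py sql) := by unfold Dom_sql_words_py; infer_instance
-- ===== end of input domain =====

-- B replaces A's three-boolean-flag character state machine with a stateless scan that
-- consumes a whole quoted region (str.partition) or a whole word run at a time (simpler; same cost).

-- word character test: char.isalnum() or char == "_"
def pvWord (c : Char) : Bool := PySem.Chars.isalnum c || c == '_'

-- ===== PORT A =====
-- flush(): append the uppercased buffer if nonempty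
def pvFlush (words : List String) (cur : List Char) : List String :=
  if cur ≠ [] then words ++ [PySem.Str.upper (String.ofList cur)] else words

-- one iteration of A's `for char in sql` loop; state = (words, in_single, in_double, in_backtick, current)
def pvStepA (st : List String × Bool × Bool × Bool × List Char) (c : Char) :
    List String × Bool × Bool × Bool × List Char :=
  let (words, s, d, b, cur) := st
  if c == '\'' && !d && !b then (pvFlush words cur, !s, d, b, [])
  else if c == '"' && !s && !b then (pvFlush words cur, s, !d, b, [])
  else if c == '`' && !s && !d then (pvFlush words cur, s, d, !b, [])
  else if s || d || b then (words, s, d, b, cur)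
  else if pvWord c then (words, s, d, b, cur ++ [c])
  else (pvFlush words cur, s, d, b, [])

def sql_words_py (sql : String) : List String :=
  let st := sql.toList.foldl pvStepA ([], false, false, false, [])
  pvFlush st.1 st.2.2.2.2

-- ===== PORT B =====
-- Source B's while-loop over the remaining suffix `s`, as structural recursion on the char list.
-- `s[1:].partition(ch)` = everything after the first `ch` in the rest (or nothing if absent):
-- ported exactly as the membership test + drop-through-first-occurrence.
theorem pvLenTail (l : List Char) : l.tail.length ≤ l.length := by
  simp [List.length_tail]

def pvGoB (cs : List Char) : List String :=
  match cs with
  | [] => []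
  | c :: rest =>
    if c == '\'' || c == '"' || c == '`' then
      if c ∈ rest then pvGoB ((rest.dropWhile (· ≠ c)).tail)
      else []
    else if pvWord c then
      PySem.Str.upper (String.ofList (c :: rest.takeWhile pvWord)) :: pvGoB (rest.dropWhile pvWord)
    else pvGoB rest
termination_by cs.length
decreasing_by
  · exact Nat.lt_succ_of_le (Nat.le_trans (pvLenTail _) (List.length_dropWhile_le _ _))
  · exact Nat.lt_succ_of_le (List.length_dropWhile_le _ _)
  · exact Nat.lt_succ_self _

def sql_words_py_alt (sql : String) : List String := pvGoB sql.toList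

-- ===== PRECONDITION & SPEC =====
def Spec_sql_words_py (sql : String) (out : List String) : Prop := out = sql_words_py_alt sql
instance (sql : String) (out : List String) : Decidable (Spec_sql_words_py sql out) := by unfold Spec_sql_words_py; infer_instance

-- ===== CLAIM (what is proved, stated in full; the proofs are below) =====
def Claim_equal_sql_words_py : Prop := ∀ (sql : String), Dom_sql_words_py sql → Spec_sql_words_py sql (sql_words_py sql)

-- ===== LEMMAS AND PROOFS =====

-- finalize A's state: the trailing flush
def pvFin (st : List String × Bool × Bool × Bool × List Char) : List String :=
  pvFlush st.1 st.2.2.2.2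

-- A quote character is not a word character.
theorem pvWord_quote_false : pvWord '\'' = false ∧ pvWord '"' = false ∧ pvWord '`' = false := by
  decide

-- L1: a run of word characters just accumulates into the buffer.
theorem pvFoldA_word_run (cs : List Char) (words : List String) (cur : List Char)
    (h : ∀ c ∈ cs, pvWord c = true) :
    List.foldl pvStepA (words, false, false, false, cur) cs
      = (words, false, false, false, cur ++ cs) := by
  induction cs generalizing cur with
  | nil => simp
  | cons c t ih =>
    have hc : pvWord c = true := h c (by simp)
    have h1 : c ≠ '\'' := by rintro rfl; simp [pvWord_quote_false.1] at hc
    have h2 : c ≠ '"' := by rintro rfl; simp [pvWord_quote_false.2.1] at hc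
    have h3 : c ≠ '`' := by rintro rfl; simp [pvWord_quote_false.2.2] at hc
    have step : pvStepA (words, false, false, false, cur) c
        = (words, false, false, false, cur ++ [c]) := by
      simp [pvStepA, h1, h2, h3, hc]
    rw [List.foldl_cons, step, ih (cur ++ [c]) (fun x hx => h x (List.mem_cons_of_mem _ hx))]
    simp

-- the A-state "inside quote q, empty buffer"
def pvQSt (q : Char) (words : List String) : List String × Bool × Bool × Bool × List Char :=
  (words, q == '\'', q == '"', q == '`', [])

-- L2: inside a quoted region A ignores everything up to (and including) the closing quote.
theorem pvFoldA_quote_skip (q : Char) (hq : q = '\'' ∨ q = '"' ∨ q = '`')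
    (cs : List Char) (words : List String) :
    List.foldl pvStepA (pvQSt q words) cs
      = if q ∈ cs then
          List.foldl pvStepA (words, false, false, false, []) ((cs.dropWhile (· ≠ q)).tail)
        else pvQSt q words := by
  induction cs with
  | nil => simp
  | cons c t ih =>
    by_cases hc : c = q
    · subst hc
      have step : pvStepA (pvQSt c words) c = (words, false, false, false, []) := by
        rcases hq with rfl | rfl | rfl <;> simp [pvStepA, pvQSt, pvFlush]
      have hdrop : ((c :: t).dropWhile (· ≠ c)).tail = t := by
        rw [List.dropWhile_cons, if_neg (by simp)]; rfl
      rw [List.foldl_cons, step, if_pos (by simp), hdrop]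
    · have step : pvStepA (pvQSt q words) c = pvQSt q words := by
        rcases hq with rfl | rfl | rfl <;> simp [pvStepA, pvQSt, hc]
      have hd : ((c :: t).dropWhile (· ≠ q)) = t.dropWhile (· ≠ q) := by
        rw [List.dropWhile_cons, if_pos (by simp [hc])]
      rw [List.foldl_cons, step, ih]
      by_cases hmem : q ∈ t
      · rw [if_pos hmem, if_pos (List.mem_cons_of_mem _ hmem), hd]
      · rw [if_neg hmem, if_neg (by simp [List.mem_cons, hmem, Ne.symm hc])]

-- L3: once the next character is not a word character, a pending buffer may be flushed early.
theorem pvFin_shift (d : List Char) (words : List String) (t : List Char) (ht : t ≠ [])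
    (hd : ∀ c, d.head? = some c → pvWord c = false) :
    pvFin (List.foldl pvStepA (words, false, false, false, t) d)
      = pvFin (List.foldl pvStepA (words ++ [PySem.Str.upper (String.ofList t)],
          false, false, false, []) d) := by
  cases d with
  | nil => simp [pvFin, pvFlush, ht]
  | cons c d' =>
    have hc : pvWord c = false := hd c rfl
    have : pvStepA (words, false, false, false, t) c
        = pvStepA (words ++ [PySem.Str.upper (String.ofList t)], false, false, false, []) c := by
      simp only [pvStepA]
      split_ifs <;> simp_all [pvFlush]
    simp only [List.foldl_cons, this]

-- head of dropWhile fails the predicate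
theorem pvHead_dropWhile (p : Char → Bool) (l : List Char) (c : Char)
    (h : (l.dropWhile p).head? = some c) : p c = false := by
  induction l with
  | nil => simp at h
  | cons x t ih =>
    rw [List.dropWhile_cons] at h
    by_cases hx : p x
    · exact ih (by simpa [hx] using h)
    · simp [hx] at h; subst h; simpa using hx

-- Main invariant: A's finalized fold from the neutral state equals words ++ B's scan.
theorem pvMain : ∀ n (cs : List Char), cs.length ≤ n → ∀ words,
    pvFin (List.foldl pvStepA (words, false, false, false, []) cs) = words ++ pvGoB cs := by
  intro n
  induction n with
  | zero =>
    intro cs hcs words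
    have : cs = [] := List.eq_nil_of_length_eq_zero (Nat.le_zero.mp hcs)
    subst this; simp [pvFin, pvFlush, pvGoB]
  | succ n ih =>
    intro cs hcs words
    match cs with
    | [] => simp [pvFin, pvFlush, pvGoB]
    | c :: rest =>
      have hrest : rest.length ≤ n := by simpa using hcs
      by_cases hquote : c = '\'' ∨ c = '"' ∨ c = '`'
      · -- quote: A enters quote mode with empty buffer; B skips the region
        have step : pvStepA (words, false, false, false, []) c = pvQSt c words := by
          rcases hquote with rfl | rfl | rfl <;> simp [pvStepA, pvQSt, pvFlush]
        rw [List.foldl_cons, step, pvFoldA_quote_skip c hquote rest words]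
        by_cases hmem : c ∈ rest
        · rw [if_pos hmem]
          have hlen : ((rest.dropWhile (· ≠ c)).tail).length ≤ n :=
            Nat.le_trans (Nat.le_trans (pvLenTail _) (List.length_dropWhile_le _ _)) hrest
          rw [ih _ hlen words]
          have : pvGoB (c :: rest) = pvGoB (rest.dropWhile (· ≠ c)).tail := by
            rw [pvGoB]
            rcases hquote with rfl | rfl | rfl <;> simp [hmem]
          rw [this]
        · rw [if_neg hmem]
          have : pvGoB (c :: rest) = [] := by
            rw [pvGoB]
            rcases hquote with rfl | rfl | rfl <;> simp [hmem]
          simp [this, pvFin, pvQSt, pvFlush]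
      · push Not at hquote
        obtain ⟨h1, h2, h3⟩ := hquote
        by_cases hw : pvWord c = true
        · -- word run
          have hsplit : c :: rest
              = (c :: rest.takeWhile pvWord) ++ rest.dropWhile pvWord := by
            simp [List.takeWhile_append_dropWhile]
          have hall : ∀ x ∈ c :: rest.takeWhile pvWord, pvWord x = true := by
            intro x hx
            rcases List.mem_cons.mp hx with rfl | hx'
            · exact hw
            · exact List.mem_takeWhile_imp hx'
          have hlen : (rest.dropWhile pvWord).length ≤ n :=
            Nat.le_trans (List.length_dropWhile_le _ _) hrest
          have hgo : pvGoB (c :: rest)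
              = PySem.Str.upper (String.ofList (c :: rest.takeWhile pvWord))
                  :: pvGoB (rest.dropWhile pvWord) := by
            rw [pvGoB]
            simp [h1, h2, h3, hw]
          rw [hgo]
          conv_lhs => rw [hsplit]
          rw [List.foldl_append, pvFoldA_word_run _ words [] hall, List.nil_append]
          rw [pvFin_shift _ words _ (by simp) (fun x hx => pvHead_dropWhile _ _ _ hx)]
          rw [ih _ hlen]
          simp
        · -- separator
          have step : pvStepA (words, false, false, false, []) c
              = (words, false, false, false, []) := by
            simp [pvStepA, pvFlush, h1, h2, h3, hw]
          rw [List.foldl_cons, step, ih _ hrest]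
          have : pvGoB (c :: rest) = pvGoB rest := by
            rw [pvGoB]; simp [h1, h2, h3, hw]
          rw [this]

-- ===== VERDICT (by name: the statement is the Claim_ definition above) =====
theorem sql_words_py_spec : Claim_equal_sql_words_py := by
  intro sql _
  unfold Spec_sql_words_py sql_words_py sql_words_py_alt
  simpa [pvFin] using pvMain sql.toList.length sql.toList (Nat.le_refl _) []
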